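-- pv_equiv track=rewrite | github.com/reddot-rpa/Call-Drop_RPA | apps/helper.py | partition_flag_generator
-- ===== SOURCE A (Python) =====
-- def partition_flag_generator(length, divisor):
--     partition = length // divisor
--     partitions = []
--     count = 1
--     for i in range(divisor):
--         if count != divisor:
--             partitions.append(partition * count)
--         else:
--             partitions.append((partition * count) + (length % divisor))
--         count += 1
--     return partitions
-- ===== SOURCE B (Python) =====
-- def partition_flag_generator(length, divisor):
--     partition = length // divisor
--     sizes = [partition] * divisor
--     if sizes:
--         sizes[-1] += length % divisor
--     out, total = [], 0
--     for s in sizes: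
--         total += s
--         out.append(total)
--     return out
-- ===== Notes on version B (the rewrite author's own statement) =====
-- stated objective: alternative
-- what changed: A multiplies partition*count inside the loop with an in-loop branch for the last boundary; B builds a list of equal segment sizes, adds the remainder to the last size, and produces the boundaries by a running prefix-sum pass.
import Mathlib
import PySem

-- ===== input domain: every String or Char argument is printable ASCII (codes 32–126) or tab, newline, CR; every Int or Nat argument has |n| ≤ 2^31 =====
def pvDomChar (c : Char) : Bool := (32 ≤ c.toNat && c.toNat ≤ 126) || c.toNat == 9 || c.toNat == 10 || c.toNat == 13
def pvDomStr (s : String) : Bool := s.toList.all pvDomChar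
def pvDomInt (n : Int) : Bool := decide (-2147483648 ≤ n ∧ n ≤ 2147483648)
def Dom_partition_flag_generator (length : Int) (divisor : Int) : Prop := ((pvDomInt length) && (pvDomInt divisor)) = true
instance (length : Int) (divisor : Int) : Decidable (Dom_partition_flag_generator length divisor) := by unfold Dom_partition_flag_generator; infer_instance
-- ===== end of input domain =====

-- B replaces A's multiply-in-loop with a last-element branch by a replicate-sizes-then-prefix-sum pass (objective: alternative decomposition; same cost).

-- ===== PORT A =====
def partition_flag_generator (length : Int) (divisor : Int) : List Int :=
  let partition := PySem.Int.floordiv length divisor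
  ((PySem.List.pyRange 0 divisor 1).foldl
    (fun (st : List Int × Int) _ =>
      if st.2 ≠ divisor then (st.1 ++ [partition * st.2], st.2 + 1)
      else (st.1 ++ [partition * st.2 + PySem.Int.mod length divisor], st.2 + 1))
    ([], 1)).1

-- ===== PORT B =====
def partition_flag_generator_alt (length : Int) (divisor : Int) : List Int :=
  let partition := PySem.Int.floordiv length divisor
  let sizes := List.replicate divisor.toNat partition
  let sizes2 :=
    if sizes.isEmpty then sizes
    else sizes.dropLast ++ [sizes.getLast! + PySem.Int.mod length divisor]
  (sizes2.foldl (fun (st : List Int × Int) s => (st.1 ++ [st.2 + s], st.2 + s)) ([], 0)).1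

-- ===== PRECONDITION & SPEC =====
-- Pre_ excludes exactly divisor = 0, where Python A raises ZeroDivisionError on 'length // divisor'.
def Pre_partition_flag_generator (length : Int) (divisor : Int) : Prop := divisor ≠ 0
instance (length : Int) (divisor : Int) : Decidable (Pre_partition_flag_generator length divisor) := by unfold Pre_partition_flag_generator; infer_instance
def pvWitness_partition_flag_generator : Int × Int := (10, 3)
def Spec_partition_flag_generator (length : Int) (divisor : Int) (out : List Int) : Prop := out = partition_flag_generator_alt length divisor
instance (length : Int) (divisor : Int) (out : List Int) : Decidable (Spec_partition_flag_generator length divisor out) := by unfold Spec_partition_flag_generator; infer_instance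

-- ===== CLAIM (what is proved, stated in full; the proofs are below) =====
def Claim_equal_partition_flag_generator : Prop := ∀ (length : Int) (divisor : Int), Dom_partition_flag_generator length divisor → Pre_partition_flag_generator length divisor → Spec_partition_flag_generator length divisor (partition_flag_generator length divisor)

-- ===== LEMMAS AND PROOFS =====

theorem pv_foldA (p r d : Int) (xs : List Int) :
    ∀ (acc : List Int) (c : Int),
    ((xs.foldl (fun (st : List Int × Int) _ =>
        if st.2 ≠ d then (st.1 ++ [p * st.2], st.2 + 1)
        else (st.1 ++ [p * st.2 + r], st.2 + 1)) (acc, c)).1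
      = acc ++ (List.range xs.length).map
          (fun (i : Nat) => if c + (i : Int) = d then p * d + r else p * (c + (i : Int)))) := by
  induction xs with
  | nil => intro acc c; simp
  | cons x xs ih =>
    intro acc c
    simp only [List.foldl_cons, List.length_cons, List.range_succ_eq_map, List.map_cons,
      List.map_map]
    by_cases hc : c = d
    · rw [if_neg (by simp [hc]), ih]
      simp only [Int.natCast_zero, add_zero, hc, List.append_assoc, List.singleton_append]
      refine congrArg _ (congrArg₂ List.cons (by simp) ?_)
      refine List.map_congr_left fun i _ => ?_
      simp only [Function.comp_apply, Nat.succ_eq_add_one]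
      push_cast
      rw [show d + 1 + (i : Int) = d + ((i : Int) + 1) from by ring]
    · rw [if_pos (by simp [hc]), ih]
      simp only [Int.natCast_zero, add_zero, List.append_assoc, List.singleton_append]
      refine congrArg _ (congrArg₂ List.cons (by rw [if_neg hc]) ?_)
      refine List.map_congr_left fun i _ => ?_
      simp only [Function.comp_apply, Nat.succ_eq_add_one]
      push_cast
      rw [show c + 1 + (i : Int) = c + ((i : Int) + 1) from by ring]

theorem pv_foldB_repl (p : Int) (k : Nat) :
    ∀ (acc : List Int) (t : Int),
    ((List.replicate k p).foldl
        (fun (st : List Int × Int) s => (st.1 ++ [st.2 + s], st.2 + s)) (acc, t))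
      = (acc ++ (List.range k).map (fun (i : Nat) => t + p * ((i : Int) + 1)), t + p * k) := by
  induction k with
  | zero => intro acc t; simp
  | succ k ih =>
    intro acc t
    simp only [List.replicate_succ, List.foldl_cons]
    rw [ih]
    simp only [List.range_succ_eq_map, List.map_cons, List.map_map, Prod.mk.injEq]
    refine ⟨?_, by push_cast; ring⟩
    simp only [Int.natCast_zero, zero_add, mul_one, List.append_assoc, List.singleton_append]
    refine congrArg _ (congrArg₂ List.cons rfl ?_)
    refine List.map_congr_left fun i _ => ?_
    simp only [Function.comp_apply, Nat.succ_eq_add_one]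
    push_cast
    ring

-- Both sides in closed form, for positive divisor.
theorem pv_closed (length divisor : Int) (hd : 0 < divisor) :
    partition_flag_generator length divisor = partition_flag_generator_alt length divisor := by
  set p := PySem.Int.floordiv length divisor with hp
  set r := PySem.Int.mod length divisor with hr
  obtain ⟨m, hm⟩ : ∃ m, divisor.toNat = m + 1 := ⟨divisor.toNat - 1, by omega⟩
  have hmd : ((m : Int) + 1) = divisor := by omega
  unfold partition_flag_generator partition_flag_generator_alt
  rw [pv_foldA p r divisor (PySem.List.pyRange 0 divisor 1) [] 1]
  have hlen : (PySem.List.pyRange 0 divisor 1).length = m + 1 := by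
    rw [PySem.List.length_pyRange_one]; omega
  rw [hlen]
  simp only [← hp, ← hr, hm]
  rw [if_neg (by simp)]
  rw [show (List.replicate (m + 1) p).dropLast = List.replicate m p from by
    simp [List.dropLast_replicate]]
  rw [show (List.replicate (m + 1) p).getLast! = p from by
    rw [List.getLast!_eq_getLast?_getD, List.getLast?_replicate]; simp]
  rw [List.foldl_append, pv_foldB_repl p m [] 0]
  simp only [List.foldl_cons, List.foldl_nil, List.nil_append]
  rw [List.range_succ, List.map_append]
  congr 1
  · refine List.map_congr_left fun i hi => ?_
    have hi' : i < m := List.mem_range.mp hi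
    rw [if_neg (by omega)]
    ring
  · simp only [List.map_cons, List.map_nil]
    rw [if_pos (by omega)]
    rw [← hmd]
    congr 1
    ring

-- ===== VERDICT (by name: the statement is the Claim_ definition above) =====
theorem partition_flag_generator_spec : Claim_equal_partition_flag_generator := by
  intro length divisor _ hpre
  unfold Spec_partition_flag_generator
  rcases lt_or_gt_of_ne hpre with hneg | hpos
  · unfold partition_flag_generator partition_flag_generator_alt
    rw [PySem.List.pyRange_one_eq_nil (by omega)]
    have h0 : divisor.toNat = 0 := by omega
    simp [h0]
  · exact pv_closed length divisor hpos
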